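-- pv_equiv track=rewrite | github.com/luismoax/Competitive-Programming---luismo | projecteuler.net/Project Euler - Problem 70 (Euler's Totient Function).py | anagramNumbers
-- ===== SOURCE A (Python) =====
-- def anagramNumbers(a , b):
--     m = {}
--     while (a > 0):
--         if m.__contains__(a % 10) == False:
--             m[a%10] = 1
--         else: m[a % 10] = int(m[a % 10]) + 1
--         a //= 10
--     while (b > 0):
--         if m.__contains__(b % 10) == False:
--             m[b%10] = -1
--         m[b % 10] = int(m[b % 10]) - 1
--         b //= 10
--
--     for item in m:
--         if m[item] != 0:
--             return False
--     return True
-- ===== SOURCE B (Python) =====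
-- def anagramNumbers(a, b):
--     def digits(x):
--         ds = []
--         while x > 0:
--             ds.append(x % 10)
--             x //= 10
--         return ds
--     return sorted(digits(a)) == sorted(digits(b))
-- ===== Notes on version B (the rewrite author's own statement) =====
-- stated objective: idiomatic
-- what changed: Replaced the shared increment/decrement frequency dict and final all-zero scan with arithmetic digit extraction into two lists that are sorted and compared for equality.
import Mathlib
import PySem

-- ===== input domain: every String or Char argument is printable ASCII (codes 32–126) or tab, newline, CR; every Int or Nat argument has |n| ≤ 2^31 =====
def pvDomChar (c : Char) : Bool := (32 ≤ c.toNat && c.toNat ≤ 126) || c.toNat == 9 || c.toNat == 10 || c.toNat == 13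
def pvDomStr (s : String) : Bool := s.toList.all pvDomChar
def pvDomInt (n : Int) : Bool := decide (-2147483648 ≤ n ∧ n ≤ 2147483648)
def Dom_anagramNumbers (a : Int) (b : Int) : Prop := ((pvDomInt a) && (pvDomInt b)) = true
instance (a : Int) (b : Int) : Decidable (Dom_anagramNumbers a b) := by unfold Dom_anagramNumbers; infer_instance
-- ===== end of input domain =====

-- B replaces A's shared increment/decrement frequency dict with extracting the two digit lists and comparing them sorted (idiomatic; not claimed faster).

-- termination helper for the digit-extraction loops (cited by the decreasing_by of the ports)
theorem pvDigitStep_lt (a : Int) (h : a > 0) : (PySem.Int.floordiv a 10).toNat < a.toNat := by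
  have h10 : (0:Int) < 10 := by norm_num
  rw [PySem.Int.floordiv_eq_ediv_of_pos h10]
  omega

-- ===== PORT A =====
-- while (a > 0): if a%10 not in m: m[a%10] = 1 else: m[a%10] = m[a%10] + 1; a //= 10
def pvLoopA (a : Int) (m : PySem.Dict Int Int) : PySem.Dict Int Int :=
  if h : a > 0 then
    pvLoopA (PySem.Int.floordiv a 10)
      (if m.contains (PySem.Int.mod a 10) = false then
         m.insert (PySem.Int.mod a 10) 1
       else
         m.insert (PySem.Int.mod a 10) (m.getD (PySem.Int.mod a 10) 0 + 1))
  else m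
termination_by a.toNat
decreasing_by exact pvDigitStep_lt a h

-- while (b > 0): if b%10 not in m: m[b%10] = -1; m[b%10] = m[b%10] - 1; b //= 10
def pvLoopB (b : Int) (m : PySem.Dict Int Int) : PySem.Dict Int Int :=
  if h : b > 0 then
    pvLoopB (PySem.Int.floordiv b 10)
      (let m' := if m.contains (PySem.Int.mod b 10) = false then
                   m.insert (PySem.Int.mod b 10) (-1)
                 else m;
       m'.insert (PySem.Int.mod b 10) (m'.getD (PySem.Int.mod b 10) 0 - 1))
  else m
termination_by b.toNat
decreasing_by exact pvDigitStep_lt b h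

-- for item in m: if m[item] != 0: return False / return True
def anagramNumbers (a : Int) (b : Int) : Bool :=
  let m := pvLoopB b (pvLoopA a PySem.Dict.empty)
  m.keys.all (fun k => m.getD k 0 == 0)

-- ===== PORT B =====
-- digits of x, least significant first, by while x > 0: ds.append(x % 10); x //= 10
def pvDigits (x : Int) : List Int :=
  if h : x > 0 then PySem.Int.mod x 10 :: pvDigits (PySem.Int.floordiv x 10) else []
termination_by x.toNat
decreasing_by exact pvDigitStep_lt x h

-- return sorted(digits(a)) == sorted(digits(b))
def anagramNumbers_alt (a : Int) (b : Int) : Bool :=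
  PySem.List.sorted (pvDigits a) (fun x => x) false == PySem.List.sorted (pvDigits b) (fun x => x) false

-- ===== PRECONDITION & SPEC =====
def Spec_anagramNumbers (a : Int) (b : Int) (out : Bool) : Prop := out = anagramNumbers_alt a b
instance (a : Int) (b : Int) (out : Bool) : Decidable (Spec_anagramNumbers a b out) := by unfold Spec_anagramNumbers; infer_instance

-- ===== CLAIM (what is proved, stated in full; the proofs are below) =====
def Claim_equal_anagramNumbers : Prop := ∀ (a : Int) (b : Int), Dom_anagramNumbers a b → Spec_anagramNumbers a b (anagramNumbers a b)

-- ===== LEMMAS AND PROOFS =====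

-- one a-loop step adds 1 at the current digit (in either branch)
theorem pvStepA_getD (m : PySem.Dict Int Int) (d0 d : Int) :
    ((if m.contains d0 = false then m.insert d0 1
      else m.insert d0 (m.getD d0 0 + 1)).getD d 0) = m.getD d 0 + (if d = d0 then 1 else 0) := by
  by_cases hd : d = d0
  · subst hd
    by_cases hc : m.contains d = false
    · rw [if_pos hc, PySem.Dict.getD_insert_self, PySem.Dict.getD_of_not_contains m 0 hc, if_pos rfl]
      norm_num
    · rw [if_neg hc, PySem.Dict.getD_insert_self, if_pos rfl]
  · by_cases hc : m.contains d0 = false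
    · rw [if_pos hc, PySem.Dict.getD_insert_of_ne _ _ _ hd, if_neg hd, add_zero]
    · rw [if_neg hc, PySem.Dict.getD_insert_of_ne _ _ _ hd, if_neg hd, add_zero]

theorem pvLoopA_getD (a : Int) (m : PySem.Dict Int Int) (d : Int) :
    (pvLoopA a m).getD d 0 = m.getD d 0 + (pvDigits a).count d := by
  induction a, m using pvLoopA.induct with
  | case1 a m h ih =>
    rw [pvLoopA, dif_pos h, pvDigits, dif_pos h, List.count_cons]
    simp only [dite_eq_ite] at ih
    rw [ih]
    simp only [pvStepA_getD]
    simp only [PySem.Int.mod_eq_emod_of_pos (show (0:Int) < 10 by norm_num),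
      PySem.Int.floordiv_eq_ediv_of_pos (show (0:Int) < 10 by norm_num)] at ih ⊢
    by_cases hd : d = a % 10
    · simp [hd] <;> omega
    · simp [hd, Ne.symm hd, beq_iff_eq] <;> omega
  | case2 a m h =>
    rw [pvLoopA, dif_neg h, pvDigits, dif_neg h]
    simp

theorem pvLoopA_mem_keys (a : Int) (m : PySem.Dict Int Int) (d : Int) :
    d ∈ (pvLoopA a m).keys ↔ d ∈ m.keys ∨ d ∈ pvDigits a := by
  induction a, m using pvLoopA.induct with
  | case1 a m h ih =>
    rw [pvLoopA, dif_pos h, pvDigits, dif_pos h]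
    simp only [dite_eq_ite] at ih
    rw [ih]
    simp only [PySem.Int.mod_eq_emod_of_pos (show (0:Int) < 10 by norm_num),
      PySem.Int.floordiv_eq_ediv_of_pos (show (0:Int) < 10 by norm_num)] at ih ⊢
    by_cases hc : m.contains (a % 10) = false <;>
      simp [hc, PySem.Dict.mem_keys_insert, List.mem_cons] <;> tauto
  | case2 a m h =>
    rw [pvLoopA, dif_neg h, pvDigits, dif_neg h]
    simp

-- one b-loop step: subtract 1, and one extra 1 the first time an unseen digit appears
theorem pvStepB_getD (m : PySem.Dict Int Int) (d0 d : Int) :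
    ((let m' := if m.contains d0 = false then m.insert d0 (-1) else m;
      m'.insert d0 (m'.getD d0 0 - 1)).getD d 0)
    = m.getD d 0 - (if d = d0 then 1 else 0) - (if d = d0 ∧ m.contains d0 = false then 1 else 0) := by
  by_cases hd : d = d0
  · subst hd
    by_cases hc : m.contains d = false
    · simp only [hc, if_true, if_pos rfl, and_self, PySem.Dict.getD_insert_self,
        PySem.Dict.getD_of_not_contains m 0 hc]
      ring
    · simp only [hc, if_pos rfl, PySem.Dict.getD_insert_self]
      simp
  · by_cases hc : m.contains d0 = false
    · simp only [hc, if_true, PySem.Dict.getD_insert_of_ne _ _ _ hd, if_neg hd]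
      simp [hd]
    · simp only [hc, PySem.Dict.getD_insert_of_ne _ _ _ hd, if_neg hd]
      simp [hd]

theorem pvStepB_contains (m : PySem.Dict Int Int) (d0 d : Int) :
    ((let m' := if m.contains d0 = false then m.insert d0 (-1) else m;
      m'.insert d0 (m'.getD d0 0 - 1)).contains d) = (d == d0 || m.contains d) := by
  by_cases hc : m.contains d0 = false <;>
    cases hb : (d == d0) <;>
      simp [hc, hb, PySem.Dict.contains_insert]

theorem pvLoopB_getD (b : Int) (m : PySem.Dict Int Int) (d : Int) :
    (pvLoopB b m).getD d 0 =
      m.getD d 0 - (pvDigits b).count d -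
        (if d ∈ pvDigits b ∧ m.contains d = false then 1 else 0) := by
  induction b, m using pvLoopB.induct with
  | case1 b m h ih =>
    rw [pvLoopB, dif_pos h, pvDigits, dif_pos h]
    simp only [dite_eq_ite] at ih
    rw [ih]
    simp only [pvStepB_getD, pvStepB_contains]
    simp only [PySem.Int.mod_eq_emod_of_pos (show (0:Int) < 10 by norm_num),
      PySem.Int.floordiv_eq_ediv_of_pos (show (0:Int) < 10 by norm_num)] at ih ⊢
    by_cases hd : d = b % 10
    · by_cases hc : m.contains (b % 10) = false <;>
        simp [hd, hc, List.count_cons, List.mem_cons] <;> push_cast <;> omega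
    · by_cases hm : d ∈ pvDigits (b / 10) <;>
        by_cases hc : m.contains d = false <;>
          simp [hd, Ne.symm hd, hm, hc, List.count_cons, List.mem_cons, beq_iff_eq,
            Bool.or_eq_false_iff, beq_eq_false_iff_ne] <;> push_cast <;> omega
  | case2 b m h =>
    rw [pvLoopB, dif_neg h, pvDigits, dif_neg h]
    simp

theorem pvLoopB_mem_keys (b : Int) (m : PySem.Dict Int Int) (d : Int) :
    d ∈ (pvLoopB b m).keys ↔ d ∈ m.keys ∨ d ∈ pvDigits b := by
  induction b, m using pvLoopB.induct with
  | case1 b m h ih =>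
    rw [pvLoopB, dif_pos h, pvDigits, dif_pos h]
    simp only [dite_eq_ite] at ih
    rw [ih]
    simp only [PySem.Int.mod_eq_emod_of_pos (show (0:Int) < 10 by norm_num),
      PySem.Int.floordiv_eq_ediv_of_pos (show (0:Int) < 10 by norm_num)] at ih ⊢
    by_cases hc : m.contains (b % 10) = false <;>
      simp [hc, PySem.Dict.mem_keys_insert, List.mem_cons] <;> tauto
  | case2 b m h =>
    rw [pvLoopB, dif_neg h, pvDigits, dif_neg h]
    simp

-- the all-values-zero test of the final dict says exactly "same digit multiset"
theorem pvCount_iff (da db : List Int) :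
    (∀ d, d ∈ da ∨ d ∈ db →
      ((da.count d : Int) - (db.count d : Int) - (if d ∈ db ∧ d ∉ da then 1 else 0) = 0))
    ↔ ∀ d, da.count d = db.count d := by
  constructor
  · intro h d
    by_cases hda : d ∈ da
    · have := h d (Or.inl hda)
      rw [if_neg (by tauto)] at this
      omega
    · by_cases hdb : d ∈ db
      · have := h d (Or.inr hdb)
        rw [if_pos ⟨hdb, hda⟩, List.count_eq_zero_of_not_mem hda] at this
        have hc : 0 < db.count d := List.count_pos_iff.mpr hdb
        omega
      · rw [List.count_eq_zero_of_not_mem hda, List.count_eq_zero_of_not_mem hdb]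
  · intro h d hmem
    have hda : d ∈ da := by
      rcases hmem with hmem | hmem
      · exact hmem
      · have := List.count_pos_iff.mpr hmem
        rw [← h d] at this
        exact List.count_pos_iff.mp this
    rw [if_neg (by tauto), h d]
    omega

theorem pvSorted_eq_iff (xs ys : List Int) :
    (PySem.List.sorted xs (fun x => x) false = PySem.List.sorted ys (fun x => x) false) ↔ xs.Perm ys := by
  constructor
  · intro h
    have hx := PySem.List.sorted_perm xs (fun x => x) false
    have hy := PySem.List.sorted_perm ys (fun x => x) false
    exact (hx.symm.trans (h ▸ hy))
  · intro h
    have h1 : (PySem.List.sorted ys (fun x => x) false).Perm xs :=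
      (PySem.List.sorted_perm ys (fun x => x) false).trans h.symm
    exact PySem.List.sorted_id_eq_of_perm_of_pairwise xs _ h1
      (PySem.List.sorted_pairwise ys (fun x => x))

-- ===== VERDICT (by name: the statement is the Claim_ definition above) =====
theorem anagramNumbers_spec : Claim_equal_anagramNumbers := by
  intro a b _
  unfold Spec_anagramNumbers
  rw [anagramNumbers, anagramNumbers_alt]
  have hcon : ∀ d : Int, ((pvLoopA a PySem.Dict.empty).contains d = false) ↔ d ∉ pvDigits a := by
    intro d
    rw [← Bool.not_eq_true, PySem.Dict.contains_iff_mem_keys, pvLoopA_mem_keys]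
    simp [PySem.Dict.keys_empty]
  have hval : ∀ d : Int, (pvLoopB b (pvLoopA a PySem.Dict.empty)).getD d 0 =
      ((pvDigits a).count d : Int) - ((pvDigits b).count d : Int) -
        (if d ∈ pvDigits b ∧ d ∉ pvDigits a then 1 else 0) := by
    intro d
    rw [pvLoopB_getD, pvLoopA_getD, PySem.Dict.getD_empty]
    simp only [hcon, zero_add]
  have hkeys : ∀ d : Int, d ∈ (pvLoopB b (pvLoopA a PySem.Dict.empty)).keys ↔
      d ∈ pvDigits a ∨ d ∈ pvDigits b := by
    intro d
    rw [pvLoopB_mem_keys, pvLoopA_mem_keys]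
    simp [PySem.Dict.keys_empty]
  rw [Bool.eq_iff_iff]
  simp only [List.all_eq_true, beq_iff_eq]
  rw [pvSorted_eq_iff, List.perm_iff_count]
  constructor
  · intro h
    apply (pvCount_iff (pvDigits a) (pvDigits b)).mp
    intro d hd
    rw [← hval d]
    exact h _ ((hkeys d).mpr hd)
  · intro h d hd
    rw [hval d]
    exact (pvCount_iff (pvDigits a) (pvDigits b)).mpr h d ((hkeys d).mp hd)
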